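-- pv_equiv track=rewrite | github.com/alenbob/studio-quantikz | quantikz_symbolic_latex.py | render_initial_state_latex
-- ===== SOURCE A (Python) =====
-- def render_initial_state_latex(
--     row_labels: list[str],
--     label_spans: dict[int, tuple[str, int]],
--     temporary_rows: set[int],
-- ) -> str:
--     factors: list[str] = []
--     consumed: set[int] = set()
--     for row in range(len(row_labels)):
--         if row in consumed or row in temporary_rows:
--             continue
--         span_entry = label_spans.get(row)
--         label = span_entry[0] if span_entry is not None else row_labels[row]
--         span = span_entry[1] if span_entry is not None else 1
--         if not label.strip():
--             label = r"\ket{0}"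
--             span = 1
--         consumed.update(range(row, row + span))
--         factors.append(label)
--     if not factors:
--         raise ValueError("No input rows were found")
--     return r" \otimes ".join(factors)
-- ===== SOURCE B (Python) =====
-- def render_initial_state_latex(
--     row_labels: list[str],
--     label_spans: dict[int, tuple[str, int]],
--     temporary_rows: set[int],
-- ) -> str:
--     factors: list[str] = []
--     i = 0
--     n = len(row_labels)
--     while i < n:
--         if i in temporary_rows:
--             i += 1
--             continue
--         entry = label_spans.get(i)
--         label, span = entry if entry is not None else (row_labels[i], 1)
--         if not label.strip():
--             label = r"\ket{0}"
--             span = 1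
--         factors.append(label)
--         i += max(span, 1)
--     if not factors:
--         raise ValueError("No input rows were found")
--     return r" \otimes ".join(factors)
-- ===== Notes on version B (the rewrite author's own statement) =====
-- stated objective: simpler
-- what changed: Replaced the for-loop over all rows with an auxiliary `consumed` skip-set by a while loop that jumps the index directly past each label's span, maintaining no set at all.
-- outside the precondition, e.g. on render_initial_state_latex([], {}, set()): A raises ValueError, B raises ValueError; on render_initial_state_latex(['a'], {}, {0}): A raises ValueError, B raises ValueError
import Mathlib
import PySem

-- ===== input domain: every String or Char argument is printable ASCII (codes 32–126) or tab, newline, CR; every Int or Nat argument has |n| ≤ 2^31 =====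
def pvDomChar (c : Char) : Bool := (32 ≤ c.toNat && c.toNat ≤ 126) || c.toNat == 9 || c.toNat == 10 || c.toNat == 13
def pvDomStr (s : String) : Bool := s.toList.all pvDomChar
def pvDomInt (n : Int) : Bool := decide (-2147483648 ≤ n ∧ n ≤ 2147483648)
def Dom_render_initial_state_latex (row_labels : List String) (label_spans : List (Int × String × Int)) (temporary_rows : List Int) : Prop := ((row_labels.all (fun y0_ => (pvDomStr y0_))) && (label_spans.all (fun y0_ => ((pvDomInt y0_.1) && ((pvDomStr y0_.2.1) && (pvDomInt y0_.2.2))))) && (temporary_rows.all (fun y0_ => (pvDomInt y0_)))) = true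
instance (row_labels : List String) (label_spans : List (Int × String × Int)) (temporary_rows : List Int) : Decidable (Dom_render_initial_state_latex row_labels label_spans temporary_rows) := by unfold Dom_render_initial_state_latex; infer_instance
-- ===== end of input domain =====

-- B replaces A's for-loop with a `consumed` skip-set by a while loop that jumps the index
-- directly past each consumed span (simpler: no auxiliary set). Return-value equivalence only;
-- where the Python A raises ValueError (all rows temporary / no rows), B raises too (outside Pre_).

-- ===== PORT A =====
-- A's for-loop over range(len(row_labels)), carrying (consumed, factors).
def pvLoopA (row_labels : List String) (spans : PySem.Dict Int (String × Int)) (temp : List Int) :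
    List Int → PySem.Set Int → List String → List String
  | [], _, factors => factors
  | row :: rest, consumed, factors =>
    if PySem.Set.contains consumed row || temp.contains row then
      pvLoopA row_labels spans temp rest consumed factors
    else
      let entry := spans.get? row
      let label := match entry with
        | some e => e.1
        | none => PySem.List.pyGetD row_labels row ""
      let span : Int := match entry with
        | some e => e.2
        | none => 1
      let blank := PySem.Str.strip label == ""
      let label := if blank then "\\ket{0}" else label
      let span : Int := if blank then 1 else span
      let consumed := PySem.Set.update consumed (PySem.List.pyRange row (row + span) 1)
      pvLoopA row_labels spans temp rest consumed (factors ++ [label])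

def render_initial_state_latex (row_labels : List String) (label_spans : List (Int × String × Int)) (temporary_rows : List Int) : String :=
  let factors := pvLoopA row_labels (PySem.Dict.mk label_spans) temporary_rows
      (PySem.List.pyRange 0 (PySem.List.len row_labels) 1) PySem.Set.empty []
  -- Python raises ValueError when factors = []; excluded by Pre_, the port returns the join ("").
  PySem.Str.join " \\otimes " factors

-- ===== PORT B =====
-- B's while loop: index i jumps past each label's span; no consumed set. The `fuel` parameter
-- (started at n, and n - i ≤ fuel throughout since i advances by ≥ 1 each step) only makes the
-- recursion structural; it never changes the computed value.
def pvLoopB (row_labels : List String) (spans : PySem.Dict Int (String × Int)) (temp : List Int)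
    (n : Nat) (fuel : Nat) (i : Nat) (factors : List String) : List String :=
  match fuel with
  | 0 => factors
  | fuel + 1 =>
    if i < n then
      if temp.contains (i : Int) then
        pvLoopB row_labels spans temp n fuel (i + 1) factors
      else
        let entry := spans.get? (i : Int)
        let p := match entry with
          | some e => e
          | none => (PySem.List.pyGetD row_labels (i : Int) "", (1 : Int))
        let p := if PySem.Str.strip p.1 = "" then ("\\ket{0}", (1 : Int)) else p
        pvLoopB row_labels spans temp n fuel (i + (max p.2 1).toNat) (factors ++ [p.1])
    else factors

def render_initial_state_latex_alt (row_labels : List String) (label_spans : List (Int × String × Int)) (temporary_rows : List Int) : String :=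
  let factors := pvLoopB row_labels (PySem.Dict.mk label_spans) temporary_rows row_labels.length row_labels.length 0 []
  PySem.Str.join " \\otimes " factors

-- ===== PRECONDITION & SPEC =====
-- Pre_ excludes exactly the inputs where Python A raises ValueError ("No input rows were found"):
-- every row index is in temporary_rows (in particular an empty row_labels). B raises there too.
def Pre_render_initial_state_latex (row_labels : List String) (label_spans : List (Int × String × Int)) (temporary_rows : List Int) : Prop :=
  ∃ i ∈ List.range row_labels.length, (i : Int) ∉ temporary_rows
instance (row_labels : List String) (label_spans : List (Int × String × Int)) (temporary_rows : List Int) : Decidable (Pre_render_initial_state_latex row_labels label_spans temporary_rows) := by unfold Pre_render_initial_state_latex; infer_instance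

def pvWitness_render_initial_state_latex : List String × (List (Int × String × Int)) × List Int :=
  (["q0", "q1"], [(0, ("\\ket{+}", 2))], [])

def Spec_render_initial_state_latex (row_labels : List String) (label_spans : List (Int × String × Int)) (temporary_rows : List Int) (out : String) : Prop := out = render_initial_state_latex_alt row_labels label_spans temporary_rows
instance (row_labels : List String) (label_spans : List (Int × String × Int)) (temporary_rows : List Int) (out : String) : Decidable (Spec_render_initial_state_latex row_labels label_spans temporary_rows out) := by unfold Spec_render_initial_state_latex; infer_instance

-- ===== CLAIM (what is proved, stated in full; the proofs are below) =====
def Claim_equal_render_initial_state_latex : Prop := ∀ (row_labels : List String) (label_spans : List (Int × String × Int)) (temporary_rows : List Int), Dom_render_initial_state_latex row_labels label_spans temporary_rows → Pre_render_initial_state_latex row_labels label_spans temporary_rows → Spec_render_initial_state_latex row_labels label_spans temporary_rows (render_initial_state_latex row_labels label_spans temporary_rows)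

-- ===== LEMMAS AND PROOFS =====

-- r+1 ≤ r + max(span,1) (B always advances)
theorem pvStep_le (r : Nat) (span : Int) : r + 1 ≤ r + (max span 1).toNat := by
  have : (1 : Int) ≤ max span 1 := le_max_right _ _
  omega

-- fuel bookkeeping: after a jump of max(span,1), n - i ≤ fuel still holds
theorem pvFuel_step (n r fuel : Nat) (span : Int) (h : n - r ≤ fuel + 1) :
    n - (r + (max span 1).toNat) ≤ fuel := by
  have := pvStep_le r span
  omega

-- The frontier invariant is preserved when A consumes [r, r+span) and B jumps to r + max(span,1).
theorem pvInv_update (c : PySem.Set Int) (r : Nat) (span : Int)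
    (hinv : ∀ j : Int, (r : Int) ≤ j → (j ∈ c ↔ j < (r : Int))) :
    ∀ j : Int, ((r + 1 : Nat) : Int) ≤ j →
      (j ∈ PySem.Set.update c (PySem.List.pyRange r ((r : Int) + span) 1) ↔
        j < ((r + (max span 1).toNat : Nat) : Int)) := by
  intro j hj
  rw [PySem.Set.mem_update c _ j, PySem.List.mem_pyRange_one]
  have h1 := hinv j (by push_cast at hj ⊢; omega)
  have hmx : (1 : Int) ≤ max span 1 := le_max_right _ _
  have hcast : ((r + (max span 1).toNat : Nat) : Int) = (r : Int) + max span 1 := by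
    push_cast; omega
  rw [hcast]
  push_cast at hj
  by_cases hs : span ≤ 1
  · rw [max_eq_right hs]
    constructor
    · rintro (hm | ⟨_, h2⟩)
      · exact absurd (h1.mp hm) (by omega)
      · omega
    · intro h2; omega
  · rw [max_eq_left (by omega : (1:Int) ≤ span)]
    constructor
    · rintro (hm | ⟨_, h2⟩)
      · exact absurd (h1.mp hm) (by omega)
      · omega
    · intro h2; exact Or.inr ⟨by omega, h2⟩

-- Invariant: at row r with frontier f (r ≤ f), membership in A's `consumed` for rows ≥ r is
-- exactly "below the frontier"; then A's remaining loop from row r equals B's loop at index f.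
theorem pvLoop_eq (row_labels : List String) (spans : PySem.Dict Int (String × Int)) (temp : List Int)
    (n : Nat) (fuel r f : Nat) (c : PySem.Set Int) (factors : List String)
    (hrf : r ≤ f) (hfuel : n - f ≤ fuel)
    (hinv : ∀ j : Int, (r : Int) ≤ j → (j ∈ c ↔ j < (f : Int))) :
    pvLoopA row_labels spans temp (PySem.List.pyRange r n 1) c factors
      = pvLoopB row_labels spans temp n fuel f factors := by
  by_cases hr : r < n
  · rw [PySem.List.pyRange_one_cons (by exact_mod_cast hr)]
    unfold pvLoopA
    by_cases hc : (r : Int) ∈ c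
    · -- row r already consumed: A skips it, B is already past it
      have hf : r < f := by have := (hinv r le_rfl).mp hc; exact_mod_cast this
      simp only [PySem.Set.contains, List.contains_eq_mem, hc, decide_true, Bool.true_or, if_true]
      have := pvLoop_eq row_labels spans temp n fuel (r + 1) f c factors (by omega) hfuel
        (fun j hj => hinv j (by push_cast at hj ⊢; omega))
      exact_mod_cast this
    · have hf : f = r := by
        have h1 := hinv r le_rfl
        have h2 : ¬ ((r : Int) < (f : Int)) := fun h => hc (h1.mpr h)
        omega
      rw [hf] at hinv hfuel ⊢
      obtain ⟨fuel, rfl⟩ : ∃ m, fuel = m + 1 := ⟨fuel - 1, by omega⟩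
      rw [pvLoopB]
      simp only [hr, if_true]
      by_cases ht : (r : Int) ∈ temp
      · -- temporary row: both advance by one
        simp only [PySem.Set.contains, List.contains_eq_mem, hc, ht, decide_true, decide_false,
          Bool.false_or, if_true]
        have := pvLoop_eq row_labels spans temp n fuel (r + 1) (r + 1) c factors le_rfl
          (by omega)
          (fun j hj => by
            have h1 := hinv j (by push_cast at hj ⊢; omega)
            push_cast at hj
            constructor
            · intro hm; have := h1.mp hm; omega
            · intro h2; push_cast at h2; omega)
        exact_mod_cast this
      · simp only [PySem.Set.contains, List.contains_eq_mem, hc, ht, decide_false,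
          Bool.false_or, Bool.false_eq_true, if_false]
        rcases hE : spans.get? (r : Int) with _ | e <;>
          dsimp only <;> simp only [beq_iff_eq] <;>
          · split <;>
            · exact pvLoop_eq row_labels spans temp n fuel (r + 1) _ _ _ (pvStep_le r _)
                (pvFuel_step n r fuel _ hfuel) (pvInv_update c r _ hinv)
  · rw [PySem.List.pyRange_one_eq_nil (by exact_mod_cast Nat.le_of_not_lt hr)]
    cases fuel with
    | zero => rfl
    | succ fuel =>
      rw [pvLoopB]
      simp only [show ¬ f < n by omega, if_false]
      rfl
termination_by (fuel, f - r)
decreasing_by all_goals omega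

theorem render_initial_state_latex_spec : Claim_equal_render_initial_state_latex := by
  intro rl ls tr _ _
  unfold Spec_render_initial_state_latex render_initial_state_latex render_initial_state_latex_alt
  have h := pvLoop_eq rl (PySem.Dict.mk ls) tr rl.length rl.length 0 0 PySem.Set.empty []
    (le_refl 0) (by omega) (by intro j hj; simp [PySem.Set.empty]; omega)
  simp [PySem.List.len] at h ⊢
  rw [h]
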